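-- pv_equiv track=rewrite | github.com/EjazAhmadvirk/Meta-Hacker-Cup-R1-2025 | Final1/solution1.py | best_divisor_leq_A
-- ===== SOURCE A (Python) =====
-- from math import isqrt
--
-- def best_divisor_leq_A(B: int, A: int) -> int:
--     """
--     Return the largest d | B with d <= A, in O(sqrt(B)).
--     """
--     if A >= B:
--         return B
--     if B % A == 0:
--         return A
--
--     best = 1
--     # Scan up to sqrt(B), checking both i and B//i
--     r = isqrt(B)
--     for i in range(1, r + 1):
--         if B % i == 0:
--             # i is a divisor
--             if i <= A and i > best:
--                 best = i
--             j = B // i  # paired divisor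
--             if j <= A and j > best:
--                 best = j
--             # Early exit: if we already hit A, it's optimal
--             if best == A:
--                 break
--     return best
-- ===== SOURCE B (Python) =====
-- from math import isqrt
--
-- def best_divisor_leq_A(B: int, A: int) -> int:
--     """
--     Largest d | B with d <= A, by two directed scans instead of one full
--     sqrt-scan: descend for the best small divisor, ascend from ceil(B/A)
--     for the cofactor of the best large divisor.
--     """
--     if A >= B:
--         return B
--     if B % A == 0:
--         return A
--
--     r = isqrt(B)
--     if A < 1:
--         return 1  # no positive divisor can be <= A
--
--     # Here 1 <= A < B, so B >= 2.
--     # Largest divisor of B that is <= min(A, r): first hit descending.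
--     small = 1
--     i = min(A, r)
--     while i >= 1:
--         if B % i == 0:
--             small = i
--             break
--         i -= 1
--
--     # Largest divisor of B in (r, A] is B // k for the smallest k >= ceil(B/A)
--     # with k <= r and k | B: first hit ascending.
--     big = 1
--     k = -(-B // A)  # ceil(B/A)
--     while k <= r:
--         if B % k == 0:
--             big = B // k
--             break
--         k += 1
--
--     return max(small, big)
-- ===== Notes on version B (the rewrite author's own statement) =====
-- stated objective: alternative
-- what changed: A maintains a running best over one full 1..sqrt(B) scan that checks each i and its cofactor B//i; B instead runs two directed first-hit scans — descending from min(A, isqrt(B)) for the best small divisor, and ascending from ceil(B/A) for the smallest cofactor of a large divisor <= A — and returns the max of the two hits.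
import Mathlib
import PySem

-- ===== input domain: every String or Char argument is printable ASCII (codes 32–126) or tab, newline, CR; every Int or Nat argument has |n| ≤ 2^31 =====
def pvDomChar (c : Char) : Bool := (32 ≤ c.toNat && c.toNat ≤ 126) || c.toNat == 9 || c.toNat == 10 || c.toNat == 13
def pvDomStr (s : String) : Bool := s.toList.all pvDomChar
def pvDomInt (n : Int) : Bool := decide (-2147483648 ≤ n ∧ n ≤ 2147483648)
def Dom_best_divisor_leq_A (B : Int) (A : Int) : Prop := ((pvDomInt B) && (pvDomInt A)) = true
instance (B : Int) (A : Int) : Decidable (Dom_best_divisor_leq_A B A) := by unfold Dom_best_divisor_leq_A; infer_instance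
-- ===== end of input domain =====

-- B replaces A's single full sqrt-scan (maintaining a running best over both
-- members of every divisor pair) by two directed first-hit scans: a descending
-- scan for the best small divisor and an ascending scan from ceil(B/A) for the
-- cofactor of the best large divisor (objective: alternative, same O(sqrt B)).

-- ===== PORT A =====
-- The for-loop with break is ported as structural recursion on the range
-- index i (a Nat; Python's i here is always ≥ 1).  isqrt(B) for B ≥ 0 is
-- exactly Nat.sqrt B.toNat; B < 0 (where isqrt raises) is outside Pre_.
def pvALoop (B : Int) (A : Int) (r : Nat) (i : Nat) (best : Int) : Int :=
  if _h : i ≤ r then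
    if PySem.Int.mod B (i : Int) = 0 then
      let best1 := if (i : Int) ≤ A ∧ (i : Int) > best then (i : Int) else best
      let j := PySem.Int.floordiv B (i : Int)
      let best2 := if j ≤ A ∧ j > best1 then j else best1
      if best2 = A then best2 else pvALoop B A r (i + 1) best2
    else pvALoop B A r (i + 1) best
  else best
termination_by r + 1 - i
decreasing_by all_goals omega

def best_divisor_leq_A (B : Int) (A : Int) : Int :=
  if A ≥ B then B
  else if PySem.Int.mod B A = 0 then A
  else pvALoop B A (Nat.sqrt B.toNat) 1 1

-- ===== PORT B =====
-- `while i >= 1: … i -= 1` : descending first-hit scan (i is ≥ 0 throughout).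
def pvSmallLoop (B : Int) (i : Nat) : Int :=
  if 1 ≤ i then
    if PySem.Int.mod B (i : Int) = 0 then (i : Int) else pvSmallLoop B (i - 1)
  else 1

-- `while k <= r: … k += 1` : ascending first-hit scan (k starts ≥ 1 here).
def pvBigLoop (B : Int) (r : Nat) (k : Nat) : Int :=
  if _h : k ≤ r then
    if PySem.Int.mod B (k : Int) = 0 then PySem.Int.floordiv B (k : Int)
    else pvBigLoop B r (k + 1)
  else 1
termination_by r + 1 - k
decreasing_by all_goals omega

-- Source B computes r = isqrt(B) before the A < 1 fallback (so it raises exactly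
-- where A does on B < 0); Nat.sqrt B.toNat is isqrt(B) for the admitted B ≥ 0.
def best_divisor_leq_A_alt (B : Int) (A : Int) : Int :=
  if A ≥ B then B
  else if PySem.Int.mod B A = 0 then A
  else
    let r := Nat.sqrt B.toNat
    if A < 1 then 1
    else
      -- here 1 ≤ A < B, so min(A, r) and ceil(B/A) = -(-B//A) are ≥ 0 and the
      -- Nat loop counters are exact
      let small := pvSmallLoop B (min A.toNat r)
      let k0 := (-(PySem.Int.floordiv (-B) A)).toNat
      let big := pvBigLoop B r k0
      max small big

-- ===== PRECONDITION & SPEC =====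
-- Pre_ excludes exactly the inputs where A raises: A = 0 with B > 0
-- (ZeroDivisionError in B % A) and B < 0 with A < B (ValueError in isqrt(B));
-- B raises the same exceptions on the same inputs.
def Pre_best_divisor_leq_A (B : Int) (A : Int) : Prop :=
  ¬(0 < B ∧ A = 0) ∧ ¬(B < 0 ∧ A < B)
instance (B : Int) (A : Int) : Decidable (Pre_best_divisor_leq_A B A) := by
  unfold Pre_best_divisor_leq_A; infer_instance

def pvWitness_best_divisor_leq_A : Int × Int := (12, 5)

def Spec_best_divisor_leq_A (B : Int) (A : Int) (out : Int) : Prop := out = best_divisor_leq_A_alt B A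
instance (B : Int) (A : Int) (out : Int) : Decidable (Spec_best_divisor_leq_A B A out) := by unfold Spec_best_divisor_leq_A; infer_instance

-- ===== CLAIM (what is proved, stated in full; the proofs are below) =====
def Claim_equal_best_divisor_leq_A : Prop := ∀ (B : Int) (A : Int), Dom_best_divisor_leq_A B A → Pre_best_divisor_leq_A B A → Spec_best_divisor_leq_A B A (best_divisor_leq_A B A)

-- ===== LEMMAS AND PROOFS =====

-- Pairing: the cofactor of a divisor above sqrt n lies at or below sqrt n.
theorem pv_cofactor_le_sqrt {n d : ℕ} (_hn : 0 < n) (hd : d ∣ n) (h : Nat.sqrt n < d) :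
    n / d ≤ Nat.sqrt n := by
  by_contra h'
  push Not at h'
  have h1 : n < (Nat.sqrt n + 1) * (Nat.sqrt n + 1) := by
    have := Nat.lt_succ_sqrt' n
    simpa [pow_two, Nat.succ_eq_add_one] using this
  have h2 : (Nat.sqrt n + 1) * (Nat.sqrt n + 1) ≤ d * (n / d) :=
    Nat.mul_le_mul h h'
  rw [Nat.mul_div_cancel' hd] at h2
  omega

-- A best value that dominates every admissible divisor is the findGreatest.
theorem pv_best_close (n a best : ℕ) (ha1 : 1 ≤ a) (hbd : best ∣ n) (hba : best ≤ a)
    (hcomp : ∀ d, d ∣ n → 1 ≤ d → d ≤ a → d ≤ best) :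
    best = Nat.findGreatest (· ∣ n) a := by
  have hGd : Nat.findGreatest (· ∣ n) a ∣ n := Nat.findGreatest_spec (P := (· ∣ n)) ha1 (one_dvd n)
  have hG1 : 1 ≤ Nat.findGreatest (· ∣ n) a := Nat.le_findGreatest ha1 (one_dvd n)
  have hGa : Nat.findGreatest (· ∣ n) a ≤ a := Nat.findGreatest_le a
  exact le_antisymm (Nat.le_findGreatest hba hbd) (hcomp _ hGd hG1 hGa)

theorem pv_aLoop_eq (n a : ℕ) (hn2 : 2 ≤ n) (ha1 : 1 ≤ a) :
    ∀ (fuel i best : ℕ), Nat.sqrt n + 1 - i ≤ fuel → 1 ≤ i → best ∣ n → 1 ≤ best → best ≤ a →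
      (∀ d, d ∣ n → 1 ≤ d → d ≤ a →
        d ≤ best ∨ (i ≤ d ∧ d ≤ Nat.sqrt n) ∨ (Nat.sqrt n < d ∧ i ≤ n / d)) →
      pvALoop (n : Int) (a : Int) (Nat.sqrt n) i (best : ℕ) = ((Nat.findGreatest (· ∣ n) a : ℕ) : Int) := by
  intro fuel
  induction fuel with
  | zero =>
    intro i best hfuel hi hbd hb1 hba hcomp
    have hir : ¬ i ≤ Nat.sqrt n := by omega
    rw [pvALoop, dif_neg hir]
    refine congrArg _ (pv_best_close n a best ha1 hbd hba fun d hd h1 h2 => ?_)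
    rcases hcomp d hd h1 h2 with h | ⟨h3, h4⟩ | ⟨h3, h4⟩
    · exact h
    · omega
    · have := pv_cofactor_le_sqrt (n := n) (by omega) hd h3
      omega
  | succ m ih =>
    intro i best hfuel hi hbd hb1 hba hcomp
    by_cases hir : i ≤ Nat.sqrt n
    · rw [pvALoop, dif_pos hir]
      by_cases hdvd : i ∣ n
      · have hm : PySem.Int.mod (n : Int) (i : Int) = 0 := by
          rw [PySem.Int.mod_natCast, Nat.cast_eq_zero]
          exact Nat.dvd_iff_mod_eq_zero.mp hdvd
        rw [if_pos hm]
        simp only [PySem.Int.floordiv_natCast, gt_iff_lt, Nat.cast_le, Nat.cast_lt,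
          ← apply_ite (fun x : ℕ => (x : Int))]
        set b2 : ℕ := (if n / i ≤ a ∧ (if i ≤ a ∧ best < i then i else best) < n / i then n / i
            else if i ≤ a ∧ best < i then i else best) with hb2def
        have hb2P : b2 ∣ n ∧ 1 ≤ b2 ∧ b2 ≤ a ∧ best ≤ b2 := by
          rw [hb2def]
          by_cases hA : i ≤ a ∧ best < i
          · rw [if_pos hA]
            by_cases hB : n / i ≤ a ∧ i < n / i
            · rw [if_pos hB]
              exact ⟨Nat.div_dvd_of_dvd hdvd, by omega, hB.1, by omega⟩
            · rw [if_neg hB]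
              exact ⟨hdvd, by omega, hA.1, by omega⟩
          · rw [if_neg hA]
            by_cases hB : n / i ≤ a ∧ best < n / i
            · rw [if_pos hB]
              exact ⟨Nat.div_dvd_of_dvd hdvd, by omega, hB.1, by omega⟩
            · rw [if_neg hB]
              exact ⟨hbd, hb1, hba, le_refl _⟩
        have hib2 : i ≤ a → i ≤ b2 := fun h => by rw [hb2def]; split_ifs <;> omega
        have hnib2 : n / i ≤ a → n / i ≤ b2 := fun h => by rw [hb2def]; split_ifs <;> omega
        by_cases hbreak : b2 = a
        · rw [if_pos (Nat.cast_inj.mpr hbreak)]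
          have haG : a = Nat.findGreatest (· ∣ n) a :=
            pv_best_close n a a ha1 (hbreak ▸ hb2P.1) le_rfl (fun d _ _ h2 => h2)
          rw [hbreak, ← haG]
        · rw [if_neg (fun h => hbreak (Nat.cast_inj.mp h))]
          refine ih (i + 1) b2 (by omega) (by omega) hb2P.1 hb2P.2.1 hb2P.2.2.1
            fun d hd h1 h2 => ?_
          rcases hcomp d hd h1 h2 with h | ⟨h3, h4⟩ | ⟨h3, h4⟩
          · exact Or.inl (by have := hb2P.2.2.2; omega)
          · by_cases hdi : d = i
            · exact Or.inl (by subst hdi; exact hib2 h2)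
            · exact Or.inr (Or.inl ⟨by omega, h4⟩)
          · by_cases hdi : n / d = i
            · have hdd : d = n / i := by rw [← hdi, Nat.div_div_self hd (by omega)]
              exact Or.inl (by rw [hdd]; exact hnib2 (hdd ▸ h2))
            · exact Or.inr (Or.inr ⟨h3, by omega⟩)
      · have hm : ¬ PySem.Int.mod (n : Int) (i : Int) = 0 := by
          rw [PySem.Int.mod_natCast, Nat.cast_eq_zero]
          intro h
          exact hdvd (Nat.dvd_of_mod_eq_zero h)
        rw [if_neg hm]
        refine ih (i + 1) best (by omega) (by omega) hbd hb1 hba fun d hd h1 h2 => ?_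
        rcases hcomp d hd h1 h2 with h | ⟨h3, h4⟩ | ⟨h3, h4⟩
        · exact Or.inl h
        · have : d ≠ i := fun he => hdvd (he ▸ hd)
          exact Or.inr (Or.inl ⟨by omega, h4⟩)
        · have : n / d ≠ i := fun he => hdvd (he ▸ Nat.div_dvd_of_dvd hd)
          exact Or.inr (Or.inr ⟨h3, by omega⟩)
    · rw [pvALoop, dif_neg hir]
      refine congrArg _ (pv_best_close n a best ha1 hbd hba fun d hd h1 h2 => ?_)
      rcases hcomp d hd h1 h2 with h | ⟨h3, h4⟩ | ⟨h3, h4⟩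
      · exact h
      · omega
      · have := pv_cofactor_le_sqrt (n := n) (by omega) hd h3
        omega

-- The A-loop never improves on 1 when A < 0 (no positive value is ≤ A).
theorem pv_aLoop_one (n : ℕ) (A : Int) (hA : A < 0) :
    ∀ (fuel i : ℕ), Nat.sqrt n + 1 - i ≤ fuel → 1 ≤ i →
      pvALoop (n : Int) A (Nat.sqrt n) i 1 = 1 := by
  intro fuel
  induction fuel with
  | zero =>
    intro i hfuel hi
    rw [pvALoop, dif_neg (by omega : ¬ i ≤ Nat.sqrt n)]
  | succ m ih =>
    intro i hfuel hi
    by_cases hir : i ≤ Nat.sqrt n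
    · rw [pvALoop, dif_pos hir]
      by_cases hm : PySem.Int.mod (n : Int) (i : Int) = 0
      · rw [if_pos hm]
        simp only [PySem.Int.floordiv_natCast]
        have e1 : ¬ ((i : Int) ≤ A ∧ (i : Int) > 1) := by
          rintro ⟨h1, -⟩
          have : (0 : Int) < (i : Int) := by exact_mod_cast hi
          omega
        have e2 : ¬ (((n / i : ℕ) : Int) ≤ A ∧ ((n / i : ℕ) : Int) > 1) := by
          rintro ⟨h1, -⟩
          have : (0 : Int) ≤ ((n / i : ℕ) : Int) := Int.natCast_nonneg _
          omega
        rw [if_neg e1, if_neg e2, if_neg (by omega : ¬ (1 : Int) = A)]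
        exact ih (i + 1) (by omega) (by omega)
      · rw [if_neg hm]
        exact ih (i + 1) (by omega) (by omega)
    · rw [pvALoop, dif_neg hir]

-- The descending scan is Nat.findGreatest of divisibility.
theorem pv_smallLoop_eq (n : ℕ) (_hn : 0 < n) :
    ∀ i, 1 ≤ i → pvSmallLoop (n : Int) i = ((Nat.findGreatest (· ∣ n) i : ℕ) : Int) := by
  intro i
  induction i with
  | zero => omega
  | succ m ih =>
    intro _
    rw [pvSmallLoop, if_pos (by omega : 1 ≤ m + 1)]
    rw [Nat.findGreatest_succ]
    by_cases hd : (m + 1) ∣ n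
    · rw [if_pos (by rw [PySem.Int.mod_natCast, Nat.cast_eq_zero]; exact Nat.dvd_iff_mod_eq_zero.mp hd),
        if_pos hd]
    · have h1 : ¬ PySem.Int.mod (n : Int) ((m + 1 : ℕ) : Int) = 0 := by
        rw [PySem.Int.mod_natCast, Nat.cast_eq_zero]
        exact fun h => hd (Nat.dvd_of_mod_eq_zero h)
      rw [if_neg h1, if_neg hd]
      have hm1 : 1 ≤ m := by
        rcases Nat.eq_zero_or_pos m with h | h
        · subst h; exact absurd (one_dvd n) hd
        · exact h
      simpa using ih hm1

-- Every value the ascending scan returns is 1 or n / k' for a divisor k' ≥ k.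
theorem pv_bigLoop_shape (n r : ℕ) :
    ∀ (fuel k : ℕ), r + 1 - k ≤ fuel → 1 ≤ k →
      pvBigLoop (n : Int) r k = 1 ∨
        ∃ k', k ≤ k' ∧ k' ∣ n ∧ 1 ≤ k' ∧ pvBigLoop (n : Int) r k = ((n / k' : ℕ) : Int) := by
  intro fuel
  induction fuel with
  | zero =>
    intro k hfuel hk
    rw [pvBigLoop, dif_neg (by omega : ¬ k ≤ r)]
    exact Or.inl rfl
  | succ m ih =>
    intro k hfuel hk
    by_cases hkr : k ≤ r
    · rw [pvBigLoop, dif_pos hkr]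
      by_cases hm : PySem.Int.mod (n : Int) (k : Int) = 0
      · rw [if_pos hm, PySem.Int.floordiv_natCast]
        have hd : k ∣ n := by
          have := hm
          rw [PySem.Int.mod_natCast, Nat.cast_eq_zero] at this
          exact Nat.dvd_of_mod_eq_zero this
        exact Or.inr ⟨k, le_rfl, hd, hk, rfl⟩
      · rw [if_neg hm]
        rcases ih (k + 1) (by omega) (by omega) with h | ⟨k', h1, h2, h3, h4⟩
        · exact Or.inl h
        · exact Or.inr ⟨k', by omega, h2, h3, h4⟩
    · rw [pvBigLoop, dif_neg hkr]
      exact Or.inl rfl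

-- If some divisor j of n lies in [k, r], the ascending scan hits a divisor ≤ j.
theorem pv_bigLoop_hit (n r : ℕ) :
    ∀ (fuel k j : ℕ), r + 1 - k ≤ fuel → 1 ≤ k → k ≤ j → j ≤ r → j ∣ n →
      ∃ k', k ≤ k' ∧ k' ≤ j ∧ k' ∣ n ∧ pvBigLoop (n : Int) r k = ((n / k' : ℕ) : Int) := by
  intro fuel
  induction fuel with
  | zero => intro k j hfuel hk hkj hjr hj; omega
  | succ m ih =>
    intro k j hfuel hk hkj hjr hj
    have hkr : k ≤ r := by omega
    rw [pvBigLoop, dif_pos hkr]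
    by_cases hm : PySem.Int.mod (n : Int) (k : Int) = 0
    · rw [if_pos hm, PySem.Int.floordiv_natCast]
      have hd : k ∣ n := by
        rw [PySem.Int.mod_natCast, Nat.cast_eq_zero] at hm
        exact Nat.dvd_of_mod_eq_zero hm
      exact ⟨k, le_rfl, hkj, hd, rfl⟩
    · rw [if_neg hm]
      have hkj' : k ≠ j := by
        intro he
        apply hm
        rw [PySem.Int.mod_natCast, Nat.cast_eq_zero]
        exact Nat.dvd_iff_mod_eq_zero.mp (he ▸ hj)
      obtain ⟨k', h1, h2, h3, h4⟩ := ih (k + 1) j (by omega) (by omega) (by omega) hjr hj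
      exact ⟨k', by omega, h2, h3, h4⟩

-- -(-B // A) is ceiling division, in Nat form.
theorem pv_ceil_eq (n a : ℕ) (hn : 1 ≤ n) (ha : 1 ≤ a) :
    -(PySem.Int.floordiv (-(n : Int)) (a : Int)) = (((n + a - 1) / a : ℕ) : Int) := by
  rw [PySem.Int.neg_floordiv_neg_eq_iff_of_pos (by exact_mod_cast ha)]
  have hdm := Nat.div_add_mod (n + a - 1) a
  have hml : (n + a - 1) % a < a := Nat.mod_lt _ (by omega)
  have hq1 : 1 ≤ (n + a - 1) / a := (Nat.one_le_div_iff (by omega)).mpr (by omega)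
  set q := (n + a - 1) / a with hqdef
  have hsub : ((q : Int) - 1) * (a : Int) = (((q - 1) * a : ℕ) : Int) := by
    push_cast [Nat.cast_sub hq1]
    ring
  have hsm : (q - 1) * a + a = q * a := by
    have h : q - 1 + 1 = q := by omega
    calc (q - 1) * a + a = (q - 1 + 1) * a := by ring
    _ = q * a := by rw [h]
  have hdm2 : q * a + (n + a - 1) % a = n + a - 1 := by rw [mul_comm q a]; exact hdm
  constructor
  · rw [hsub]
    exact_mod_cast (by omega : (q - 1) * a < n)
  · exact_mod_cast (by omega : n ≤ q * a)

-- B's two first-hit scans combine to the findGreatest divisor ≤ a.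
theorem pv_alt_main (n a : ℕ) (hn2 : 2 ≤ n) (ha1 : 1 ≤ a) :
    max (pvSmallLoop (n : Int) (min a (Nat.sqrt n))) (pvBigLoop (n : Int) (Nat.sqrt n) ((n + a - 1) / a))
      = ((Nat.findGreatest (· ∣ n) a : ℕ) : Int) := by
  have hr1 : 1 ≤ Nat.sqrt n := Nat.sqrt_pos.mpr (by omega)
  set r := Nat.sqrt n with hrdef
  set q := (n + a - 1) / a with hqdef
  set G := Nat.findGreatest (· ∣ n) a with hGdef
  -- facts about q
  have hdm := Nat.div_add_mod (n + a - 1) a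
  have hml : (n + a - 1) % a < a := Nat.mod_lt _ (by omega)
  have hdm2 : q * a + (n + a - 1) % a = n + a - 1 := by
    rw [mul_comm q a]; exact hdm
  have hq1 : 1 ≤ q := (Nat.one_le_div_iff (by omega)).mpr (by omega)
  have hqn : n ≤ q * a := by omega
  have hq1a : (q - 1) * a < n := by
    have hsm : (q - 1) * a + a = q * a := by
      have h : q - 1 + 1 = q := by omega
      calc (q - 1) * a + a = (q - 1 + 1) * a := by ring
      _ = q * a := by rw [h]
    omega
  have hnq : n / q ≤ a := by
    have h1 : n / q < a + 1 := by
      rw [Nat.div_lt_iff_lt_mul (by omega)]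
      calc n ≤ q * a := hqn
      _ < (a + 1) * q := by nlinarith
    omega
  -- facts about G
  have hGd : G ∣ n := Nat.findGreatest_spec (P := (· ∣ n)) ha1 (one_dvd n)
  have hG1 : 1 ≤ G := Nat.le_findGreatest ha1 (one_dvd n)
  have hGa : G ≤ a := Nat.findGreatest_le a
  -- the small scan
  have hmin1 : 1 ≤ min a r := by omega
  rw [pv_smallLoop_eq n (by omega) (min a r) hmin1]
  set s := Nat.findGreatest (· ∣ n) (min a r) with hsdef
  have hsd : s ∣ n := Nat.findGreatest_spec (P := (· ∣ n)) hmin1 (one_dvd n)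
  have hs1 : 1 ≤ s := Nat.le_findGreatest hmin1 (one_dvd n)
  have hsa : s ≤ min a r := Nat.findGreatest_le _
  have hsG : s ≤ G := Nat.le_findGreatest (by omega) hsd
  -- the big scan: its value as a Nat, bounded by G
  obtain ⟨bigN, hbeq, hbG⟩ :
      ∃ bigN, pvBigLoop (n : Int) r q = ((bigN : ℕ) : Int) ∧ bigN ≤ G := by
    rcases pv_bigLoop_shape n r (r + 1) q (by omega) hq1 with h | ⟨k', h1, h2, h3, h4⟩
    · exact ⟨1, h, hG1⟩
    · refine ⟨n / k', h4, ?_⟩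
      have hk'a : n / k' ≤ a := le_trans (Nat.div_le_div_left h1 (by omega)) hnq
      rcases Nat.eq_zero_or_pos (n / k') with h0 | h0
      · omega
      · exact Nat.le_findGreatest hk'a (Nat.div_dvd_of_dvd h2)
  rw [hbeq, ← Nat.cast_max]
  refine congrArg _ (le_antisymm (max_le hsG hbG) ?_)
  by_cases hGr : G ≤ r
  · exact le_trans (Nat.le_findGreatest (by omega) hGd) (le_max_left s bigN)
  · -- G is a large divisor: its cofactor j = n / G lies in [q, r]
    push Not at hGr
    have hj : n / G ∣ n := Nat.div_dvd_of_dvd hGd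
    have hjr : n / G ≤ r := pv_cofactor_le_sqrt (by omega) hGd hGr
    have hGn : G * (n / G) = n := Nat.mul_div_cancel' hGd
    have hj1 : 1 ≤ n / G := Nat.div_pos (Nat.le_of_dvd (by omega) hGd) (by omega)
    have hjq : q ≤ n / G := by
      by_contra hlt
      push Not at hlt
      have h5 : a * (n / G) ≤ a * (q - 1) := Nat.mul_le_mul_left a (by omega)
      have h6 : n ≤ a * (n / G) := by
        calc n = G * (n / G) := hGn.symm
        _ ≤ a * (n / G) := Nat.mul_le_mul_right _ hGa
      have h7 : a * (q - 1) = (q - 1) * a := mul_comm _ _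
      omega
    obtain ⟨k', h1, h2, h3, h4⟩ := pv_bigLoop_hit n r (r + 1) q (n / G) (by omega) hq1 hjq hjr hj
    have hbigN : bigN = n / k' := by
      have := hbeq.symm.trans h4
      exact_mod_cast this
    have hGle : G ≤ n / k' := by
      calc G = n / (n / G) := (Nat.div_div_self hGd (by omega)).symm
      _ ≤ n / k' := Nat.div_le_div_left h2 (by omega)
    rw [hbigN] at *
    exact le_trans hGle (le_max_right s (n / k'))

-- ===== VERDICT (by name: the statement is the Claim_ definition above) =====
theorem best_divisor_leq_A_spec : Claim_equal_best_divisor_leq_A := by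
  intro B A _hDom hPre
  unfold Spec_best_divisor_leq_A best_divisor_leq_A best_divisor_leq_A_alt
  by_cases hge : A ≥ B
  · rw [if_pos hge, if_pos hge]
  rw [if_neg hge, if_neg hge]
  by_cases hmod : PySem.Int.mod B A = 0
  · rw [if_pos hmod, if_pos hmod]
  rw [if_neg hmod, if_neg hmod]
  -- past the guards B is positive: B = 0 would give B % A = 0, and Pre_
  -- excludes B < 0 with A < B
  have hB1 : 1 ≤ B := by
    rcases hPre with ⟨hP1, hP2⟩
    by_contra h
    have hAB : A < B := by omega
    have hB0 : B = 0 := by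
      rcases lt_or_ge B 0 with hB | hB
      · exact absurd ⟨hB, hAB⟩ hP2
      · omega
    exact hmod (by rw [hB0]; exact (PySem.Int.mod_eq_zero_iff_dvd 0 A).mpr (dvd_zero A))
  lift B to ℕ using (by omega : (0 : Int) ≤ B) with n hn
  have hn1 : 1 ≤ n := by exact_mod_cast hB1
  simp only [Int.toNat_natCast]
  by_cases hA1 : A < 1
  · rw [if_pos hA1]
    have hA0 : A < 0 := by
      by_contra h
      exact hPre.1 ⟨by exact_mod_cast hB1, by omega⟩
    exact pv_aLoop_one n A hA0 (Nat.sqrt n + 1) 1 (by omega) le_rfl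
  · rw [if_neg hA1]
    lift A to ℕ using (by omega : (0 : Int) ≤ A) with a hA
    have ha1 : 1 ≤ a := by exact_mod_cast (by omega : (1 : Int) ≤ (a : Int))
    have hn2 : 2 ≤ n := by
      have : (a : Int) < (n : Int) := by omega
      have : a < n := by exact_mod_cast this
      omega
    simp only [Int.toNat_natCast]
    rw [pv_ceil_eq n a (by omega) ha1, Int.toNat_natCast]
    rw [show (1 : Int) = ((1 : ℕ) : Int) from rfl]
    rw [pv_aLoop_eq n a hn2 ha1 (Nat.sqrt n + 1) 1 1 (by omega) le_rfl (one_dvd n) le_rfl ha1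
      (fun d hd h1 h2 => ?_), pv_alt_main n a hn2 ha1]
    by_cases hdr : d ≤ Nat.sqrt n
    · exact Or.inr (Or.inl ⟨h1, hdr⟩)
    · refine Or.inr (Or.inr ⟨by omega, ?_⟩)
      exact Nat.div_pos (Nat.le_of_dvd (by omega) hd) (by omega)
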